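-- pv_equiv track=rewrite | github.com/DeepMathLLM/Moonshine | storage/dynamic_memory_store.py | _split_block
-- ===== SOURCE A (Python) =====
-- from typing import Dict, List, Optional
--
-- def _split_block(block: str) -> Dict[str, object]:
--     meta: Dict[str, str] = {}
--     body_lines: List[str] = []
--     in_body = False
--     for line in block.splitlines():
--         if not in_body and not line.strip():
--             in_body = True
--             continue
--         if not in_body and ":" in line:
--             key, value = line.split(":", 1)
--             meta[key.strip()] = value.strip()
--         else:
--             in_body = True
--             body_lines.append(line)
--     meta["body"] = "\n".join(body_lines).strip()
--     return meta
-- ===== SOURCE B (Python) =====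
-- def _split_block(block):
--     lines = block.splitlines()
--     # Phase 1: split off the maximal prefix of header lines (non-blank and containing ':').
--     def is_header(line):
--         return bool(line.strip()) and ":" in line
--     i = 0
--     while i < len(lines) and is_header(lines[i]):
--         i += 1
--     headers, rest = lines[:i], lines[i:]
--     # Phase 2: a blank boundary line is consumed, a non-colon line stays in the body.
--     if rest and not rest[0].strip():
--         rest = rest[1:]
--     # Phase 3: build meta from the header prefix, then the body in bulk.
--     meta = {}
--     for h in headers:
--         key, value = h.split(":", 1)
--         meta[key.strip()] = value.strip()
--     meta["body"] = "\n".join(rest).strip()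
--     return meta
-- ===== Notes on version B (the rewrite author's own statement) =====
-- stated objective: alternative
-- what changed: Replaces A's single flag-driven pass (which parses headers and accumulates body lines one by one under an in_body flag) with three staged passes: split the line list at the first non-header line (span), consume a blank boundary line, then build meta from the header prefix and the body from the remaining lines in bulk.
import Mathlib
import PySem

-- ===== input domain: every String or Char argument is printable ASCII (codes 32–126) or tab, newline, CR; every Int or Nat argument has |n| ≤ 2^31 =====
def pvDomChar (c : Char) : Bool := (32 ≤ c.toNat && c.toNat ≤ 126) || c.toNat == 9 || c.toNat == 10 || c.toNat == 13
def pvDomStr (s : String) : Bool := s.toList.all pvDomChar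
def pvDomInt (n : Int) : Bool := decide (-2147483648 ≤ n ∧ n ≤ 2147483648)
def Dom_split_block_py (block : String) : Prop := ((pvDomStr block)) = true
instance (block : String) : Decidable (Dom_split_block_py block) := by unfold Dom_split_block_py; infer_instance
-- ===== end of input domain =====

-- B replaces A's flag-driven accumulating pass with three staged passes: span off the header
-- prefix, consume a blank boundary line, then build the metadata and the bulk body; alternative
-- decomposition, same cost.


-- ===== PORT A =====
-- A's loop over block.splitlines() with state (meta-dict, body_lines, in_body)
def pvALoop : List String → PySem.Dict String String → List String → Bool →
    PySem.Dict String String × List String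
  | [], acc, body, _ => (acc, body)
  | l :: rest, acc, body, inBody =>
    if !inBody && PySem.Str.strip l == "" then
      pvALoop rest acc body true
    else if !inBody && PySem.Str.isIn ":" l then
      let parts := (PySem.Str.splitMax? l ":" 1).getD []
      pvALoop rest (acc.insert (PySem.Str.strip (parts.getD 0 ""))
        (PySem.Str.strip (parts.getD 1 ""))) body inBody
    else
      pvALoop rest acc (body ++ [l]) true

def split_block_py (block : String) : List (String × String) :=
  let st := pvALoop (PySem.Str.splitlines block) PySem.Dict.empty [] false
  (st.1.insert "body" (PySem.Str.strip (PySem.Str.join "\n" st.2))).items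

-- ===== PORT B =====
-- phase 1: is_header and the while-loop computing the header prefix / remainder split
def pvIsHeader (l : String) : Bool :=
  !(PySem.Str.strip l == "") && PySem.Str.isIn ":" l

def pvSpanHeaders : List String → List String × List String
  | [] => ([], [])
  | l :: rest =>
    if pvIsHeader l then
      let s := pvSpanHeaders rest
      (l :: s.1, s.2)
    else ([], l :: rest)

-- phase 2: consume a blank boundary line
def pvDropBlank : List String → List String
  | [] => []
  | l :: rest => if PySem.Str.strip l == "" then rest else l :: rest

-- phase 3: one header line into acc
def pvAddHeader (acc : PySem.Dict String String) (h : String) : PySem.Dict String String :=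
  let parts := (PySem.Str.splitMax? h ":" 1).getD []
  acc.insert (PySem.Str.strip (parts.getD 0 "")) (PySem.Str.strip (parts.getD 1 ""))

def split_block_py_alt (block : String) : List (String × String) :=
  let s := pvSpanHeaders (PySem.Str.splitlines block)
  let rest := pvDropBlank s.2
  let acc := s.1.foldl pvAddHeader PySem.Dict.empty
  (acc.insert "body" (PySem.Str.strip (PySem.Str.join "\n" rest))).items

-- ===== PRECONDITION & SPEC =====
def Spec_split_block_py (block : String) (out : List (String × String)) : Prop := out = split_block_py_alt block
instance (block : String) (out : List (String × String)) : Decidable (Spec_split_block_py block out) := by unfold Spec_split_block_py; infer_instance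

-- ===== CLAIM (what is proved, stated in full; the proofs are below) =====
def Claim_equal_split_block_py : Prop := ∀ (block : String), Dom_split_block_py block → Spec_split_block_py block (split_block_py block)

-- ===== LEMMAS AND PROOFS =====

-- once in_body, A's loop appends every remaining line to the body
theorem pvALoop_true (ls : List String) (acc : PySem.Dict String String)
    (body : List String) : pvALoop ls acc body true = (acc, body ++ ls) := by
  induction ls generalizing body with
  | nil => simp [pvALoop]
  | cons l rest ih => simp [pvALoop, ih]

-- A's pass equals B's staged passes: acc is the fold over the header prefix,
-- and the body A accumulates is exactly the boundary-adjusted remainder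
theorem pvALoop_eq_staged (ls : List String) (acc : PySem.Dict String String) :
    pvALoop ls acc [] false =
      ((pvSpanHeaders ls).1.foldl pvAddHeader acc, pvDropBlank (pvSpanHeaders ls).2) := by
  induction ls generalizing acc with
  | nil => simp [pvALoop, pvSpanHeaders, pvDropBlank]
  | cons l rest ih =>
    by_cases hb : PySem.Str.strip l == ""
    · simp [pvALoop, pvSpanHeaders, pvIsHeader, pvDropBlank, hb, pvALoop_true]
    · by_cases hc : PySem.Chars.isIn [':'] l.toList
      · simp [pvALoop, pvSpanHeaders, pvIsHeader, PySem.Str.isIn, hb, hc, ih, pvAddHeader]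
      · simp [pvALoop, pvSpanHeaders, pvIsHeader, PySem.Str.isIn, pvDropBlank, hb, hc, pvALoop_true]

-- ===== VERDICT (by name: the statement is the Claim_ definition above) =====
theorem split_block_py_spec : Claim_equal_split_block_py := by
  intro block _
  unfold Spec_split_block_py split_block_py split_block_py_alt
  rw [pvALoop_eq_staged]
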